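-- pv_equiv track=rewrite | github.com/abhishek-0002/DSA-Competitive-Programming | Maximum_even_sum_subsequence.py | getmaximumEvenSum
-- ===== SOURCE A (Python) =====
-- def getmaximumEvenSum(val):
--     INT_MIN = -100000000
--     n =len(val)
--     pos_sum = 0
--     for i in range(n):
--         if (val[i] > 0):
--             pos_sum += val[i]
--
--     # If sum is even, it is our answer
--     if (pos_sum % 2 == 0):
--         return pos_sum
--
--     # Traverse the array to find the
--     # maximum sum by adding a positive
--     # odd or subtracting a negative odd
--     ans = INT_MIN;
--     for i in range(n):
--         if (val[i] % 2 != 0):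
--             if (val[i] > 0):
--                 ans = max(ans, pos_sum - val[i])
--             else:
--                 ans = max(ans, pos_sum + val[i])
--     return ans
-- ===== SOURCE B (Python) =====
-- def getmaximumEvenSum(val):
--     # Parity DP: best achievable subsequence sum of even parity (empty allowed)
--     # and of odd parity (None until an odd sum is achievable).
--     even = 0
--     odd = None
--     for x in val:
--         if x % 2 == 0:
--             even = max(even, even + x)
--             if odd is not None:
--                 odd = max(odd, odd + x)
--         else:
--             new_even = even if odd is None else max(even, odd + x)
--             new_odd = even + x if odd is None else max(odd, even + x)
--             even, odd = new_even, new_odd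
--     return even
-- ===== Notes on version B (the rewrite author's own statement) =====
-- stated objective: alternative
-- what changed: Replaces A's positive-sum-then-fix-parity strategy (sum positives, then scan for the best odd element to add/remove) by a parity dynamic program over even/odd states: one fold maintains the best even-parity and best odd-parity subsequence sums and returns the even state, never computing pos_sum or a minimum odd magnitude.
import Mathlib
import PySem

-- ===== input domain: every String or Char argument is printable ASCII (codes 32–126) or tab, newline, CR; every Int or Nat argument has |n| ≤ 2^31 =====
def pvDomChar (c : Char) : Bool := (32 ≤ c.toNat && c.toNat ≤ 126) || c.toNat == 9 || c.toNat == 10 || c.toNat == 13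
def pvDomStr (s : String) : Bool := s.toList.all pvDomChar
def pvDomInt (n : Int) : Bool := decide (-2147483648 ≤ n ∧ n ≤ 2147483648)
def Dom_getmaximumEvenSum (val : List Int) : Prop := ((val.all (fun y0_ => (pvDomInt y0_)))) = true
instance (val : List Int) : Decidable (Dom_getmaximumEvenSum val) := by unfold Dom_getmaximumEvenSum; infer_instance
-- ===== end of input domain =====

-- B replaces A's positive-sum-then-fix-parity strategy by a parity dynamic program:
-- one fold over the list maintaining the best even-parity and best odd-parity
-- subsequence sums, returning the even state.


-- ===== PORT A =====
-- indices from range(n) are always in range, ported via pyGetD; Python's x % 2 on Int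
-- agrees with Lean's emod for the positive divisor 2.
def getmaximumEvenSum (val : List Int) : Int :=
  let INT_MIN : Int := -100000000
  let n : Int := val.length
  let pos_sum : Int :=
    (PySem.List.pyRange 0 n 1).foldl
      (fun s i =>
        let x := PySem.List.pyGetD val i 0
        if x > 0 then s + x else s) 0
  if pos_sum % 2 = 0 then pos_sum
  else
    (PySem.List.pyRange 0 n 1).foldl
      (fun ans i =>
        let x := PySem.List.pyGetD val i 0
        if x % 2 ≠ 0 then
          if x > 0 then max ans (pos_sum - x) else max ans (pos_sum + x)
        else ans) INT_MIN

-- ===== PORT B =====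
-- one DP step: state = (best even-parity sum, best odd-parity sum if any)
def pvStep (st : Int × Option Int) (x : Int) : Int × Option Int :=
  if x % 2 = 0 then
    (max st.1 (st.1 + x),
     match st.2 with
     | none => none
     | some o => some (max o (o + x)))
  else
    (match st.2 with
     | none => st.1
     | some o => max st.1 (o + x),
     some (match st.2 with
           | none => st.1 + x
           | some o => max o (st.1 + x)))

def getmaximumEvenSum_alt (val : List Int) : Int :=
  (val.foldl pvStep (0, none)).1

-- ===== PRECONDITION & SPEC =====
def Spec_getmaximumEvenSum (val : List Int) (out : Int) : Prop := out = getmaximumEvenSum_alt val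
instance (val : List Int) (out : Int) : Decidable (Spec_getmaximumEvenSum val out) := by unfold Spec_getmaximumEvenSum; infer_instance

-- ===== CLAIM =====
def Claim_equal_getmaximumEvenSum : Prop := ∀ (val : List Int), Dom_getmaximumEvenSum val → Spec_getmaximumEvenSum val (getmaximumEvenSum val)

-- ===== LEMMAS AND PROOFS =====

-- sum of the positive elements, as a plain function
def pvPos (l : List Int) : Int := (l.map (fun x => if x > 0 then x else 0)).sum

-- minimum |x| over odd elements, as a plain recursive function
def pvMinOdd : List Int → Option Int
  | [] => none
  | x :: t =>
    if x % 2 ≠ 0 then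
      match pvMinOdd t with
      | none => some |x|
      | some m => some (min |x| m)
    else pvMinOdd t

theorem pvPos_cons (x : Int) (t : List Int) :
    pvPos (x :: t) = (if x > 0 then x else 0) + pvPos t := by
  simp [pvPos]

theorem pvPos_nonneg (l : List Int) : 0 ≤ pvPos l := by
  induction l with
  | nil => simp [pvPos]
  | cons x t ih => rw [pvPos_cons]; split <;> omega

theorem pvPos_append (l : List Int) (x : Int) :
    pvPos (l ++ [x]) = pvPos l + (if x > 0 then x else 0) := by
  simp [pvPos]

theorem pvMinOdd_append (l : List Int) (x : Int) :
    pvMinOdd (l ++ [x]) =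
      if x % 2 ≠ 0 then
        match pvMinOdd l with
        | none => some |x|
        | some m => some (min m |x|)
      else pvMinOdd l := by
  induction l with
  | nil =>
    by_cases h : x % 2 ≠ 0 <;> simp [pvMinOdd, h]
  | cons y t ih =>
    rw [List.cons_append, pvMinOdd, pvMinOdd, ih]
    by_cases hy : y % 2 ≠ 0
    · rw [if_pos hy, if_pos hy]
      by_cases hx : x % 2 ≠ 0
      · rw [if_pos hx, if_pos hx]
        cases pvMinOdd t with
        | none => simp [min_comm]
        | some m =>
          simp only [Option.some.injEq, min_def]
          split_ifs <;> omega
      · rw [if_neg hx, if_neg hx]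
    · rw [if_neg hy, if_neg hy]

-- no odd element ⟹ the positive sum is even
theorem pvPos_even_of_no_odd (l : List Int) (h : pvMinOdd l = none) :
    pvPos l % 2 = 0 := by
  induction l with
  | nil => simp [pvPos]
  | cons x t ih =>
    rw [pvPos_cons]
    by_cases hx : x % 2 ≠ 0
    · rw [pvMinOdd, if_pos hx] at h
      rcases hmt : pvMinOdd t with _ | m <;> rw [hmt] at h <;> simp at h
    · rw [pvMinOdd, if_neg hx] at h
      have := ih h
      split <;> omega

-- the minimum odd |x| is at least 1
theorem pvMinOdd_pos (l : List Int) (m : Int) (h : pvMinOdd l = some m) :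
    1 ≤ m := by
  induction l generalizing m with
  | nil => simp [pvMinOdd] at h
  | cons x t ih =>
    by_cases hx : x % 2 ≠ 0
    · rw [pvMinOdd, if_pos hx] at h
      have hax : 1 ≤ |x| := by
        have : x ≠ 0 := by intro h0; subst h0; simp at hx
        have := abs_pos.mpr this
        omega
      cases ht : pvMinOdd t with
      | none => rw [ht] at h; simp at h; omega
      | some m' =>
        rw [ht] at h; simp at h
        have := ih m' ht
        omega
    · rw [pvMinOdd, if_neg hx] at h
      exact ih m h

-- if the positive sum is odd, an odd element exists and the least odd |x| is ≤ pvPos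
theorem minOdd_of_odd_pos (l : List Int) (h : pvPos l % 2 = 1) :
    ∃ m, pvMinOdd l = some m ∧ m ≤ pvPos l := by
  induction l with
  | nil => simp [pvPos] at h
  | cons x t ih =>
    rw [pvPos_cons] at h ⊢
    by_cases hodd : x % 2 ≠ 0
    · by_cases hx : x > 0
      · refine ⟨?_, ?_, ?_⟩
        · exact match pvMinOdd t with | none => |x| | some m => min |x| m
        · simp [pvMinOdd, hodd]; cases pvMinOdd t <;> simp
        · have := pvPos_nonneg t
          have hax : |x| = x := abs_of_pos hx
          cases pvMinOdd t <;> simp [hx] <;> omega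
      · rw [if_neg hx] at h
        obtain ⟨m, hm, hle⟩ := ih (by omega)
        refine ⟨min |x| m, ?_, ?_⟩
        · simp [pvMinOdd, hodd, hm]
        · rw [if_neg hx]; omega
    · have hpar : pvPos t % 2 = 1 := by split at h <;> omega
      obtain ⟨m, hm, hle⟩ := ih hpar
      refine ⟨m, ?_, ?_⟩
      · simp [pvMinOdd, hodd, hm]
      · split <;> omega

-- A's first loop computes pvPos
theorem posFold_eq (l : List Int) (a : Int) :
    l.foldl (fun s x => if x > 0 then s + x else s) a = a + pvPos l := by
  induction l generalizing a with
  | nil => simp [pvPos]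
  | cons x t ih => simp only [List.foldl_cons, ih, pvPos_cons]; split <;> omega

-- on an odd element, A's two-sided max step is 'max ans (S - |x|)'
theorem odd_step (S x : Int) (h : x % 2 ≠ 0) (ans : Int) :
    (if x > 0 then max ans (S - x) else max ans (S + x)) = max ans (S - |x|) := by
  rcases lt_trichotomy x 0 with hx | hx | hx
  · rw [if_neg (by omega), abs_of_neg hx]; ring_nf
  · omega
  · rw [if_pos hx, abs_of_pos hx]

-- A's second loop computes the max over odd elements of S - |x|
theorem ansFold_eq (S : Int) (l : List Int) (a : Int) :
    l.foldl
      (fun ans x =>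
        if x % 2 ≠ 0 then
          if x > 0 then max ans (S - x) else max ans (S + x)
        else ans) a
      = match pvMinOdd l with
        | none => a
        | some m => max a (S - m) := by
  induction l generalizing a with
  | nil => simp [pvMinOdd]
  | cons x t ih =>
    simp only [List.foldl_cons]
    by_cases hodd : x % 2 ≠ 0
    · rw [if_pos hodd, odd_step S x hodd, ih, pvMinOdd, if_pos hodd]
      cases h : pvMinOdd t with
      | none => simp
      | some m =>
        simp only []
        rw [max_assoc]
        congr 1
        rcases le_total (|x|) m with hm | hm
        · rw [min_eq_left hm, max_eq_left (by omega)]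
        · rw [min_eq_right hm, max_eq_right (by omega)]
    · rw [if_neg hodd, ih, pvMinOdd, if_neg hodd]

-- the closed-form value of B's DP state after processing l
def pvE (l : List Int) : Int :=
  if pvPos l % 2 = 0 then pvPos l else pvPos l - (pvMinOdd l).getD 0
def pvO (l : List Int) : Option Int :=
  (pvMinOdd l).map (fun m => if pvPos l % 2 = 0 then pvPos l - m else pvPos l)

-- invariant of B's fold
theorem state_eq (l : List Int) :
    l.foldl pvStep (0, none) = (pvE l, pvO l) := by
  induction l using List.reverseRecOn with
  | nil => simp [pvE, pvO, pvPos, pvMinOdd]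
  | append_singleton t x ih =>
    rw [List.foldl_append, ih, List.foldl_cons, List.foldl_nil]
    have hS' := pvPos_append t x
    have hM' := pvMinOdd_append t x
    have hax : |x| = if 0 ≤ x then x else -x := by
      rcases le_or_gt 0 x with h | h
      · rw [abs_of_nonneg h, if_pos h]
      · rw [abs_of_neg h, if_neg (by omega)]
    by_cases he : x % 2 = 0
    · -- even element: parity and minimum unchanged
      rw [if_neg (by simpa using he)] at hM'
      cases hM : pvMinOdd t with
      | none =>
        have hev := pvPos_even_of_no_odd t hM
        simp only [pvStep, if_pos he, pvE, pvO, hM, hS', hM', Option.map_none, Option.getD,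
          Prod.mk.injEq]
        refine ⟨?_, trivial⟩
        simp only [max_def]; split_ifs <;> omega
      | some m =>
        simp only [pvStep, if_pos he, pvE, pvO, hM, hS', hM', Option.map_some, Option.getD_some,
          Prod.mk.injEq, Option.some.injEq]
        constructor <;> (simp only [max_def]; split_ifs <;> omega)
    · -- odd element
      rw [if_pos (by simpa using he)] at hM'
      have hxo : x % 2 = 1 := by omega
      cases hM : pvMinOdd t with
      | none =>
        have hev := pvPos_even_of_no_odd t hM
        rw [hM] at hM'
        simp only [pvStep, if_neg he, pvE, pvO, hM, hS', hM', Option.map_none,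
          Option.getD, Option.map_some, Prod.mk.injEq, Option.some.injEq]
        constructor <;> (rw [hax]; split_ifs <;> omega)
      | some m =>
        rw [hM] at hM'
        have hm1 := pvMinOdd_pos t m hM
        simp only [pvStep, if_neg he, pvE, pvO, hM, hS', hM', Option.map_some, Option.getD_some,
          Prod.mk.injEq, Option.some.injEq]
        constructor <;> (simp only [max_def, min_def]; rw [hax]; split_ifs <;> omega)

-- ===== VERDICT =====
theorem getmaximumEvenSum_spec : Claim_equal_getmaximumEvenSum := by
  intro val _
  unfold Spec_getmaximumEvenSum getmaximumEvenSum getmaximumEvenSum_alt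
  simp only []
  rw [PySem.List.foldl_pyRange_zero_pyGetD' val 0
        (fun s x => if x > 0 then s + x else s) 0,
      posFold_eq, zero_add, state_eq]
  by_cases hpar : pvPos val % 2 = 0
  · simp [hpar, pvE]
  · have h1 : pvPos val % 2 = 1 := by omega
    obtain ⟨m, hm, hle⟩ := minOdd_of_odd_pos val h1
    rw [if_neg hpar,
        PySem.List.foldl_pyRange_zero_pyGetD' val 0
          (fun ans x =>
            if x % 2 ≠ 0 then
              if x > 0 then max ans (pvPos val - x) else max ans (pvPos val + x)
            else ans) (-100000000),
        ansFold_eq, hm]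
    simp only [pvE, if_neg hpar, hm, Option.getD_some]
    have := pvPos_nonneg val
    rw [max_eq_right (by omega)]
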